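-- pv_equiv track=rewrite | github.com/ppalantir/axjingWorks | 笔试/test02.py | chek_str
-- ===== SOURCE A (Python) =====
-- def chek_str(str_in):
--     chek_str='helloworld'
--     strl=len(chek_str)
--     count=0
--     for i in range(len(chek_str)):
--         str_tmp=chek_str[i]
--         str_in_tmp=str_in[i:len(str_in)]
--         if str_tmp in str_in_tmp:
--             count=count+1
--     if count==strl:
--         return True
--     else:
--         return False
-- ===== SOURCE B (Python) =====
-- def chek_str(str_in):
--     last = {}
--     for idx, ch in enumerate(str_in):
--         last[ch] = idx
--     target = 'helloworld'
--     return all(last.get(target[i], -1) >= i for i in range(len(target)))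
-- ===== Notes on version B (the rewrite author's own statement) =====
-- stated objective: alternative
-- what changed: B builds a last-occurrence index table in one pass over the input and checks each target character against it by lookup, instead of slicing a fresh suffix and scanning it for every target character.
import Mathlib
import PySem

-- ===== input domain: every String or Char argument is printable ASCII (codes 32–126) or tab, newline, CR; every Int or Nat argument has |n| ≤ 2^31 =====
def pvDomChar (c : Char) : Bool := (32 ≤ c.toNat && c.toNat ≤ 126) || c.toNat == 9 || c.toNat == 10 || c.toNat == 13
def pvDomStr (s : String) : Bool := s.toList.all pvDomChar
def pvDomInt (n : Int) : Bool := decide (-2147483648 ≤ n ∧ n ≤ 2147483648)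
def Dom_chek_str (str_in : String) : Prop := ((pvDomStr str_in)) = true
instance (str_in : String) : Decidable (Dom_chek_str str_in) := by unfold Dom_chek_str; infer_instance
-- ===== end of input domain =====

-- B replaces A's per-character suffix slicing and scanning by a single last-occurrence
-- index built in one pass, then bounded lookups (objective: alternative decomposition).

-- ===== PORT A =====
def chek_str (str_in : String) : Bool :=
  let tgt := "helloworld".toList
  let strl : Int := tgt.length
  let count : Int :=
    (PySem.List.pyRange 0 (tgt.length : Int) 1).foldl (fun count i =>
      let str_tmp := PySem.List.pyGetD tgt i ' '
      let str_in_tmp := PySem.List.slice str_in.toList (some i) (some (str_in.toList.length : Int))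
      if PySem.Chars.isIn [str_tmp] str_in_tmp then count + 1 else count) 0
  count == strl

-- ===== PORT B =====
def chek_str_alt (str_in : String) : Bool :=
  let last : PySem.Dict Char Int :=
    (PySem.List.enumerate str_in.toList 0).foldl
      (fun d p => d.insert p.2 p.1) PySem.Dict.empty
  let target := "helloworld".toList
  (List.range target.length).all
    (fun i => decide ((i : Int) ≤ last.getD (PySem.List.pyGetD target (i : Int) ' ') (-1)))

-- ===== PRECONDITION & SPEC =====
def Spec_chek_str (str_in : String) (out : Bool) : Prop := out = chek_str_alt str_in
instance (str_in : String) (out : Bool) : Decidable (Spec_chek_str str_in out) := by unfold Spec_chek_str; infer_instance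

-- ===== CLAIM (what is proved, stated in full; the proofs are below) =====
def Claim_equal_chek_str : Prop := ∀ (str_in : String), Dom_chek_str str_in → Spec_chek_str str_in (chek_str str_in)

-- ===== LEMMAS AND PROOFS =====

-- B's last-occurrence dict characterised: a lookup is ≥ i  ⟺  the char occurs in the suffix from i
lemma lastDict_getD_iff (xs : List Char) (c : Char) (i : Nat) :
    ((i : Int) ≤ ((PySem.List.enumerate xs 0).foldl
        (fun d p => d.insert p.2 p.1) (PySem.Dict.empty : PySem.Dict Char Int)).getD c (-1))
      ↔ c ∈ xs.drop i := by
  induction xs using List.reverseRecOn with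
  | nil => simp [PySem.List.enumerate, PySem.Dict.getD_empty]; omega
  | append_singleton xs x ih =>
      rw [PySem.List.enumerate_append, List.foldl_append]
      simp only [PySem.List.enumerate, List.foldl_cons, List.foldl_nil]
      rw [PySem.Dict.getD_insert, List.drop_append]
      by_cases hc : c = x
      · subst hc
        simp only [List.mem_append]
        constructor
        · intro h
          right
          have : i ≤ xs.length := by exact_mod_cast (by simpa using h)
          simp [Nat.sub_eq_zero_of_le this]
        · intro h
          rcases h with h | h
          · have : i < xs.length := by
              by_contra hlt
              simp [List.drop_eq_nil_of_le (by omega : xs.length ≤ i)] at h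
            push_cast; omega
          · have : i ≤ xs.length := by
              by_contra hlt
              have : (List.drop (i - xs.length) [c]) = [] :=
                List.drop_eq_nil_of_le (by simp; omega)
              simp [this] at h
            push_cast; omega
      · rw [if_neg hc, ih, List.mem_append]
        constructor
        · exact Or.inl
        · rintro (h | h)
          · exact h
          · exfalso; exact hc (by
              have := List.mem_of_mem_drop h; simpa using this)

-- A's 0/1-count over range n equals n  ⟺  every index passes the test
lemma countP_range_full (n : Nat) (p : Nat → Bool) :
    ((((List.range n).countP p : Nat) : Int) = (n : Int)) ↔ ∀ j ∈ List.range n, p j = true := by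
  rw [Nat.cast_inj]
  have h := @List.countP_eq_length _ (List.range n) p
  rwa [List.length_range] at h

-- A's suffix-membership test at index j  ⟺  B's table lookup at index j
lemma pointwise_test (s : String) (j : Nat) :
    PySem.Chars.isIn [PySem.List.pyGetD "helloworld".toList (j : Int) ' ']
        (PySem.List.slice s.toList (some (j : Int)) (some (s.toList.length : Int))) = true
      ↔ (j : Int) ≤ ((PySem.List.enumerate s.toList 0).foldl
          (fun d p => d.insert p.2 p.1) (PySem.Dict.empty : PySem.Dict Char Int)).getD
            (PySem.List.pyGetD "helloworld".toList (j : Int) ' ') (-1) := by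
  rw [PySem.List.slice_natCast]
  have ht : List.take (s.toList.length - j) (List.drop j s.toList) = List.drop j s.toList := by
    apply List.take_of_length_le; simp
  rw [ht, PySem.Chars.isIn_iff_infix, List.singleton_infix_iff, lastDict_getD_iff]

-- ===== VERDICT (by name: the statement is the Claim_ definition above) =====
theorem chek_str_spec : Claim_equal_chek_str := by
  intro s _
  show chek_str s = chek_str_alt s
  unfold chek_str chek_str_alt
  simp only [PySem.List.foldl_if_add_one, zero_add]
  rw [Bool.eq_iff_iff, beq_iff_eq, List.all_eq_true]
  have hlen : ("helloworld".toList.length : Int) = ((10 : Nat) : Int) := by decide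
  have h10 : "helloworld".toList.length = 10 := by decide
  rw [hlen, PySem.List.pyRange_zero_natCast, List.countP_map, h10, countP_range_full]
  refine forall₂_congr fun j hj => ?_
  simp only [Function.comp, decide_eq_true_eq]
  exact pointwise_test s j
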